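-- pv_equiv track=rewrite | github.com/MSQFuersti/aoc2020 | twentysecond.py | parseCardDecks
-- ===== SOURCE A (Python) =====
-- def parseCardDecks(csvFile):
--     playerOne = []
--     playerTwo = []
--
--     isFirst = True
--     for row in csvFile:
--         if len(row) > 1:
--             continue
--         if not row:
--             isFirst = False
--             continue
--         if isFirst:
--             playerOne.append(int(row[0]))
--         else:
--             playerTwo.append(int(row[0]))
--
--     return [playerOne, playerTwo]
-- ===== SOURCE B (Python) =====
-- def parseCardDecks(csvFile):
--     rows = [row for row in csvFile if len(row) <= 1]
--     split = next((i for i, row in enumerate(rows) if not row), len(rows))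
--     playerOne = [int(row[0]) for row in rows[:split]]
--     playerTwo = [int(row[0]) for row in rows[split:] if row]
--     return [playerOne, playerTwo]
-- ===== Notes on version B (the rewrite author's own statement) =====
-- stated objective: alternative
-- what changed: B replaces A's single stateful flag-toggling pass with a filter-then-partition decomposition: keep the short rows, split at the first blank row, and build each deck with its own comprehension.
import Mathlib
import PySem

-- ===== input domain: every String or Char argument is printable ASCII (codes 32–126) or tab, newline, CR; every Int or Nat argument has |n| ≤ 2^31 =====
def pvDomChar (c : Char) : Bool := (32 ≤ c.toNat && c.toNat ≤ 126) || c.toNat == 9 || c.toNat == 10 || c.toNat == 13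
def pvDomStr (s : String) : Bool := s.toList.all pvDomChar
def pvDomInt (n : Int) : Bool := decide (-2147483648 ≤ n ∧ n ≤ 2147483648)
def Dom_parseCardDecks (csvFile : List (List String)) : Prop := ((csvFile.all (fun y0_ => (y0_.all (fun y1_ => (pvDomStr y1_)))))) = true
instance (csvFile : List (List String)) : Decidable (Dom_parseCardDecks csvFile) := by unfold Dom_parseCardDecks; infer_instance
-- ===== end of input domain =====

-- B restructures A's single stateful flag-toggling pass as filter-then-partition (split at the
-- first blank row); equivalence of the RETURN values is proved on Pre_ (rows whose card parses).

-- int(row[0]) for a one-element row; Pre_ guarantees the parse succeeds (none = ValueError)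
def pvRowInt (r : List String) : Int := (PySem.Int.ofStr? (r.headD "")).getD 0

-- ===== PORT A =====
def stepA (st : List Int × List Int × Bool) (row : List String) : List Int × List Int × Bool :=
  if row.length > 1 then st
  else if row.isEmpty then (st.1, st.2.1, false)
  else if st.2.2 then (st.1 ++ [pvRowInt row], st.2.1, st.2.2)
  else (st.1, st.2.1 ++ [pvRowInt row], st.2.2)

def parseCardDecks (csvFile : List (List String)) : List (List Int) :=
  let st := csvFile.foldl stepA ([], [], true)
  [st.1, st.2.1]

-- ===== PORT B =====
def parseCardDecks_alt (csvFile : List (List String)) : List (List Int) :=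
  let rows := csvFile.filter (fun r => decide (r.length ≤ 1))
  let split := rows.findIdx (fun r => r.isEmpty)
  let playerOne := (rows.take split).map pvRowInt
  let playerTwo := ((rows.drop split).filter (fun r => !r.isEmpty)).map pvRowInt
  [playerOne, playerTwo]

-- ===== PRECONDITION & SPEC =====
-- Pre_ excludes exactly the inputs where Python's int(row[0]) raises ValueError (a one-element
-- row whose sole entry is not an int literal).
def Pre_parseCardDecks (csvFile : List (List String)) : Prop :=
  ∀ r ∈ csvFile, r.length = 1 → (PySem.Int.ofStr? (r.headD "")).isSome
instance (csvFile : List (List String)) : Decidable (Pre_parseCardDecks csvFile) := by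
  unfold Pre_parseCardDecks; infer_instance
def pvWitness_parseCardDecks : List (List String) := [["3"], ["1"], [], ["2"], ["a", "b"]]
def Spec_parseCardDecks (csvFile : List (List String)) (out : List (List Int)) : Prop := out = parseCardDecks_alt csvFile
instance (csvFile : List (List String)) (out : List (List Int)) : Decidable (Spec_parseCardDecks csvFile out) := by unfold Spec_parseCardDecks; infer_instance

-- ===== CLAIM (what is proved, stated in full; the proofs are below) =====
def Claim_equal_parseCardDecks : Prop := ∀ (csvFile : List (List String)), Dom_parseCardDecks csvFile → Pre_parseCardDecks csvFile → Spec_parseCardDecks csvFile (parseCardDecks csvFile)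

-- ===== LEMMAS AND PROOFS =====

-- once the flag is off, A only accumulates nonempty short rows into player two
lemma loopA_false (l : List (List String)) : ∀ p1 p2 : List Int,
    l.foldl stepA (p1, p2, false)
      = (p1, p2 ++ ((l.filter (fun r => decide (r.length ≤ 1) && !r.isEmpty)).map pvRowInt), false) := by
  induction l with
  | nil => simp
  | cons r l ih =>
    intro p1 p2
    by_cases h1 : r.length > 1
    · have : ¬ r.length ≤ 1 := by omega
      simp [stepA, h1, this, ih]
    · by_cases h2 : r.isEmpty
      · simp [stepA, h1, h2, ih, Nat.not_lt.mp h1]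
      · simp [stepA, h1, h2, ih p1 (p2 ++ [pvRowInt r]), Nat.not_lt.mp h1]

-- with the flag on, A's two accumulators end as B's take/drop at the first blank short row
lemma loopA_true (l : List (List String)) : ∀ p1 p2 : List Int,
    (l.foldl stepA (p1, p2, true)).1
        = p1 ++ ((l.filter (fun r => decide (r.length ≤ 1))).take
            ((l.filter (fun r => decide (r.length ≤ 1))).findIdx (fun r => r.isEmpty))).map pvRowInt
    ∧ (l.foldl stepA (p1, p2, true)).2.1
        = p2 ++ (((l.filter (fun r => decide (r.length ≤ 1))).drop
            ((l.filter (fun r => decide (r.length ≤ 1))).findIdx (fun r => r.isEmpty))).filter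
              (fun r => !r.isEmpty)).map pvRowInt := by
  induction l with
  | nil => simp
  | cons r l ih =>
    intro p1 p2
    by_cases h1 : r.length > 1
    · have : ¬ r.length ≤ 1 := by omega
      simp [stepA, h1, this, ih]
    · have hle : r.length ≤ 1 := Nat.not_lt.mp h1
      by_cases h2 : r.isEmpty
      · simp [stepA, h1, h2, hle, loopA_false, List.findIdx_cons, List.filter_filter]
        congr 1
        exact List.filter_congr (fun a _ => Bool.and_comm ..)
      · have := ih (p1 ++ [pvRowInt r]) p2
        simp [stepA, h1, h2, hle, List.findIdx_cons, this]

-- ===== VERDICT (by name: the statement is the Claim_ definition above) =====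
theorem parseCardDecks_spec : Claim_equal_parseCardDecks := by
  intro csvFile _ _
  unfold Spec_parseCardDecks parseCardDecks parseCardDecks_alt
  have h := loopA_true csvFile [] []
  simp only [List.nil_append] at h
  simp [h.1, h.2]
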